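-- pv_equiv track=rewrite | github.com/gstrazds/twagents | twutils/twutils/playthroughs.py | extract_pathtrace
-- ===== SOURCE A (Python) =====
-- def extract_pathtrace(cmd_history):
--     pathtrace = []
--     for (cmd, locname, ok, _reward_) in reversed(cmd_history):
--         if ok and cmd.startswith("go "):
--             pathtrace.append((cmd, locname))
--         else:
--             break
--     pathtrace.reverse()
--     return pathtrace
-- ===== SOURCE B (Python) =====
-- def extract_pathtrace(cmd_history):
--     pathtrace = []
--     for (cmd, locname, ok, _reward_) in cmd_history:
--         if ok and cmd.startswith("go "):
--             pathtrace.append((cmd, locname))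
--         else:
--             pathtrace = []
--     return pathtrace
-- ===== Notes on version B (the rewrite author's own statement) =====
-- stated objective: alternative
-- what changed: Single forward pass that resets the accumulator on every non-matching entry, instead of A's reversed traversal with break plus a final reverse.
import Mathlib
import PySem

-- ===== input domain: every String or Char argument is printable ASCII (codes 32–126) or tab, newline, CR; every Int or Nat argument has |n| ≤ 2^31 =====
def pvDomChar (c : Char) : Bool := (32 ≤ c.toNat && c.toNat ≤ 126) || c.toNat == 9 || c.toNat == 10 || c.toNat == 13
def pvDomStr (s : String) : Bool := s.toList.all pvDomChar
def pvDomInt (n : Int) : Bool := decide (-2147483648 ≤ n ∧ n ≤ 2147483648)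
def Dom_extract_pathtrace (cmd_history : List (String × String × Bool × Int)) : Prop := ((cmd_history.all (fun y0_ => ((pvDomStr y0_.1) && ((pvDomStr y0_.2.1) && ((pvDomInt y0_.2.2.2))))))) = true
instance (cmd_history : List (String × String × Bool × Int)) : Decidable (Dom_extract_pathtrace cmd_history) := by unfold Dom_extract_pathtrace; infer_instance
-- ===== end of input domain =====

-- B replaces A's reversed traversal + break + final reverse with a single forward pass
-- that resets its accumulator on every non-matching entry (objective: alternative).


-- ===== PORT A =====
-- the loop's test: ok and cmd.startswith("go ")
def pvGoOk (t : String × String × Bool × Int) : Bool :=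
  t.2.2.1 && PySem.Str.startswith t.1 "go "

-- A's loop over reversed(cmd_history): append while the test holds, break at the first failure
def pvALoop : List (String × String × Bool × Int) → List (String × String)
  | [] => []
  | t :: rest => if pvGoOk t then (t.1, t.2.1) :: pvALoop rest else []

def extract_pathtrace (cmd_history : List (String × String × Bool × Int)) : List (String × String) :=
  (pvALoop cmd_history.reverse).reverse

-- ===== PORT B =====
-- forward pass: append on a match, reset the accumulator otherwise
def extract_pathtrace_alt (cmd_history : List (String × String × Bool × Int)) : List (String × String) :=
  cmd_history.foldl (fun acc t => if pvGoOk t then acc ++ [(t.1, t.2.1)] else []) []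

-- ===== PRECONDITION & SPEC =====
def Spec_extract_pathtrace (cmd_history : List (String × String × Bool × Int)) (out : List (String × String)) : Prop := out = extract_pathtrace_alt cmd_history
instance (cmd_history : List (String × String × Bool × Int)) (out : List (String × String)) : Decidable (Spec_extract_pathtrace cmd_history out) := by unfold Spec_extract_pathtrace; infer_instance

-- ===== CLAIM (what is proved, stated in full; the proofs are below) =====
def Claim_equal_extract_pathtrace : Prop := ∀ (cmd_history : List (String × String × Bool × Int)), Dom_extract_pathtrace cmd_history → Spec_extract_pathtrace cmd_history (extract_pathtrace cmd_history)

-- ===== LEMMAS AND PROOFS =====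
theorem pv_foldl_eq_aloop (l : List (String × String × Bool × Int)) :
    l.foldl (fun acc t => if pvGoOk t then acc ++ [(t.1, t.2.1)] else []) []
      = (pvALoop l.reverse).reverse := by
  induction l using List.reverseRecOn with
  | nil => rfl
  | append_singleton ys x ih =>
    rw [List.foldl_append, List.reverse_append]
    simp only [List.foldl_cons, List.foldl_nil, List.reverse_singleton, List.singleton_append,
      pvALoop, ih]
    by_cases h : pvGoOk x = true
    · simp [h]
    · simp [h]

-- ===== VERDICT (by name: the statement is the Claim_ definition above) =====
theorem extract_pathtrace_spec : Claim_equal_extract_pathtrace := by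
  intro l _
  unfold Spec_extract_pathtrace extract_pathtrace extract_pathtrace_alt
  exact (pv_foldl_eq_aloop l).symm
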